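-- pv_equiv track=rewrite | github.com/mei-chen/beagle | Dogbone/richtext/xmldiff.py | split_space_prefix
-- ===== SOURCE A (Python) =====
-- def split_space_prefix(p):
--     """ Extracts prefix consisting of only spaces from string. """
--     m = len(p)
--     i = 0
--     while i < m:
--         if not p[i].isspace():
--             break
--         i += 1
--     return p[:i], p[i:]
-- ===== SOURCE B (Python) =====
-- def split_space_prefix(p):
--     """ Extracts prefix consisting of only spaces from string. """
--     rest = p.lstrip()
--     i = len(p) - len(rest)
--     return p[:i], rest
-- ===== Notes on version B (the rewrite author's own statement) =====
-- stated objective: idiomatic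
-- what changed: Replaces the explicit index-scanning while loop with str.lstrip: the whitespace boundary is derived from the length difference, no loop or per-character branch remains.
import Mathlib
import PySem

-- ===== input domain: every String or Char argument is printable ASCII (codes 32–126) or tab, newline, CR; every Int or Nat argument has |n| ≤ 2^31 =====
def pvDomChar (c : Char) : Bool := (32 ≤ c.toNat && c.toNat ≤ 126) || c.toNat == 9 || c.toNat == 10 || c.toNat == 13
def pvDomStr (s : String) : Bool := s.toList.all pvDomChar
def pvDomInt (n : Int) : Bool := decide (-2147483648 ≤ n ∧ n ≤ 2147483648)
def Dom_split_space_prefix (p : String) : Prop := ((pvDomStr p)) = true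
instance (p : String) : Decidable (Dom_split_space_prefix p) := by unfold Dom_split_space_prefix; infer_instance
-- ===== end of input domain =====

-- B replaces A's explicit index-scanning while loop with lstrip plus a length difference (idiomatic).


-- ===== PORT A =====
-- the while loop: advance i while i < m and p[i].isspace(), break otherwise
def spaceScan (cs : List Char) : Nat :=
  match cs with
  | [] => 0
  | c :: t => if PySem.Chars.isspace c then spaceScan t + 1 else 0

def split_space_prefix (p : String) : String × String :=
  let i : Nat := spaceScan p.toList
  (String.ofList (PySem.List.slice p.toList none (some (i : Int))),
   String.ofList (PySem.List.slice p.toList (some (i : Int)) none))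

-- ===== PORT B =====
def split_space_prefix_alt (p : String) : String × String :=
  let rest := PySem.Str.lstrip p
  let i : Int := PySem.Str.len p - PySem.Str.len rest
  (String.ofList (PySem.List.slice p.toList none (some i)), rest)

-- ===== PRECONDITION & SPEC =====
def Spec_split_space_prefix (p : String) (out : String × String) : Prop := out = split_space_prefix_alt p
instance (p : String) (out : String × String) : Decidable (Spec_split_space_prefix p out) := by unfold Spec_split_space_prefix; infer_instance

-- ===== CLAIM (what is proved, stated in full; the proofs are below) =====
def Claim_equal_split_space_prefix : Prop := ∀ (p : String), Dom_split_space_prefix p → Spec_split_space_prefix p (split_space_prefix p)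

-- ===== LEMMAS AND PROOFS =====
theorem spaceScan_eq_takeWhile (cs : List Char) :
    spaceScan cs = (cs.takeWhile PySem.Chars.isspace).length := by
  induction cs with
  | nil => rfl
  | cons c t ih =>
    simp only [spaceScan, List.takeWhile]
    by_cases h : PySem.Chars.isspace c <;> simp [h, ih]

theorem lstrip_toList (p : String) :
    (PySem.Str.lstrip p).toList = p.toList.dropWhile PySem.Chars.isspace := by
  simp [PySem.Str.toList_lstrip, PySem.Chars.lstrip]

-- ===== VERDICT (by name: the statement is the Claim_ definition above) =====
theorem split_space_prefix_spec : Claim_equal_split_space_prefix := by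
  intro p _
  unfold Spec_split_space_prefix split_space_prefix split_space_prefix_alt
  have hl : (PySem.Str.lstrip p).toList = p.toList.dropWhile PySem.Chars.isspace := lstrip_toList p
  have hlen : PySem.Str.len p - PySem.Str.len (PySem.Str.lstrip p)
      = (p.toList.takeWhile PySem.Chars.isspace).length := by
    have h1 : PySem.Str.len (PySem.Str.lstrip p) = (p.toList.dropWhile PySem.Chars.isspace).length := by
      rw [← hl]; simp [PySem.Str.len_eq]
    have h2 : PySem.Str.len p = p.toList.length := by simp [PySem.Str.len_eq]
    have h3 : (p.toList.takeWhile PySem.Chars.isspace).length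
        + (p.toList.dropWhile PySem.Chars.isspace).length = p.toList.length := by
      rw [← List.length_append, List.takeWhile_append_dropWhile]
    omega
  simp only [hlen, spaceScan_eq_takeWhile]
  refine Prod.ext rfl ?_
  have : PySem.List.slice p.toList (some ((p.toList.takeWhile PySem.Chars.isspace).length : Int)) none
      = p.toList.drop (p.toList.takeWhile PySem.Chars.isspace).length :=
    PySem.List.slice_from_natCast _ _
  rw [this]
  have hdrop : ∀ (l : List Char),
      l.drop (l.takeWhile PySem.Chars.isspace).length = l.dropWhile PySem.Chars.isspace := by
    intro l
    induction l with
    | nil => rfl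
    | cons c t ih =>
      by_cases h : PySem.Chars.isspace c <;>
        simp [List.takeWhile, List.dropWhile, h, ih]
  rw [hdrop, ← hl]
  rw [String.ofList_toList]
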